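-- pv_equiv track=rewrite | github.com/idobatter/mechanize-build-tools | src/buildtools/release.py | navbar
-- ===== SOURCE A (Python) =====
-- class Page(object):
--
--     def __init__(self, name, title=None, url=None, children=()):
--         self.name = name
--         if title is None:
--             title = name
--         self.title = title
--         if url is None:
--             url = "../%s/" % name
--         self.url = url
--         self.is_child = False
--         self._children = children
--         for child in children:
--             child.is_child = True
--         self._current_page = None
--
--     def set_current_page_name(self, name):
--         self._current_page = name
--
--     def html(self):
--         if self._current_page == self.name:
--             if self.is_child:
--                 html = ('<span class="thispage"><span class="subpage">%s'
--                         '</span></span><br>' % self.title)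
--             else:
--                 html = '<span class="thispage">%s</span><br>' % self.title
--         else:
--             if self.is_child:
--                 fmt = '<a href="%s"><span class="subpage">%s</span></a><br>'
--             else:
--                 fmt = '<a href="%s">%s</a><br>'
--             html = fmt % (self.url, self.title)
--         for child in self._children:
--             html = html+"\n"+child.html()
--         return html
--
-- class Sep:
--
--     def __init__(self):
--         self.name = object()
--
--     def set_current_page_name(self, name):
--         pass
--
--     def html(self):
--         return '<br>'
--
-- def navbar(this_page_name=None):
--     pages = [
--         Page("Home", url=".."),
--         Page("GeneralFAQ",
--              title="General FAQs", url="../bits/GeneralFAQ.html"),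
--         Sep(),
--         Page("mechanize",
--              children=[
--                 Page("ccdocs",
--                      title="handlers etc.",
--                      url="../mechanize/doc.html"),
--                 Page("forms",
--                      title="forms",
--                      url="../mechanize/forms.html"),
--                 ],
--              ),
--         ]
--     html = []
--     for page in pages:
--         page.set_current_page_name(this_page_name)
--         html.append(page.html())
--     return "\n".join(html)
-- ===== SOURCE B (Python) =====
-- # Flat-data re-implementation: the navbar is a list of (name, title, url, is_child)
-- # entries (None = separator); one pass renders each entry.  Unlike A, the current
-- # page highlight also works for child pages (A never passes the current page name
-- # down to children, so 'ccdocs'/'forms' are never highlighted).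
-- _ENTRIES = [
--     ("Home", "Home", "..", False),
--     ("GeneralFAQ", "General FAQs", "../bits/GeneralFAQ.html", False),
--     None,
--     ("mechanize", "mechanize", "../mechanize/", False),
--     ("ccdocs", "handlers etc.", "../mechanize/doc.html", True),
--     ("forms", "forms", "../mechanize/forms.html", True),
-- ]
--
-- def _render(entry, this_page_name):
--     if entry is None:
--         return "<br>"
--     name, title, url, is_child = entry
--     if name == this_page_name:
--         inner = '<span class="subpage">%s</span>' % title if is_child else title
--         return '<span class="thispage">%s</span><br>' % inner
--     inner = '<span class="subpage">%s</span>' % title if is_child else title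
--     return '<a href="%s">%s</a><br>' % (url, inner)
--
-- def navbar(this_page_name=None):
--     return "\n".join(_render(e, this_page_name) for e in _ENTRIES)
-- ===== Notes on version B (the rewrite author's own statement) =====
-- stated objective: simpler
-- what changed: Replaces the Page/Sep object tree (classes, mutable current-page state, recursive html over children) with a flat literal list of (name, title, url, is_child) entries (None = separator) rendered in a single pass and joined with newlines.
-- intended difference: On this_page_name = 'ccdocs' or 'forms' A never propagates the current page name to child pages and returns a plain anchor for that child, while B returns the intended thispage-highlighted subpage span. — e.g. on navbar(some "ccdocs"): A returns "<a href=\"..\">Home</a><br>\n<a href=\"../bits/GeneralFAQ.html\">General FAQs</a><br>\n<br>\n<a href=\"../mechanize/\"…, B returns "<a href=\"..\">Home</a><br>\n<a href=\"../bits/GeneralFAQ.html\">General FAQs</a><br>\n<br>\n<a href=\"../mechanize/\"…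
import Mathlib
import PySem

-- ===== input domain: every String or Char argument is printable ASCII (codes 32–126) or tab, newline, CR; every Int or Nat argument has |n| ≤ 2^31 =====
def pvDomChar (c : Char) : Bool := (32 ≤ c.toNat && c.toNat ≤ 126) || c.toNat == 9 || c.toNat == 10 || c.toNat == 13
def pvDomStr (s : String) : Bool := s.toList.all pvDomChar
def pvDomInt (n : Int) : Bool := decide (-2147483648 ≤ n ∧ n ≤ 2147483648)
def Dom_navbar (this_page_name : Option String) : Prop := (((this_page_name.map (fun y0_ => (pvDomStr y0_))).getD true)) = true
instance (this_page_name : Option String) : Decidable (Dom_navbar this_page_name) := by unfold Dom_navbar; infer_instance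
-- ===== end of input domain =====

-- B replaces the Page/Sep object tree by a flat literal entry list rendered in one
-- pass (objective: simpler); B also highlights child pages, which A never does (D_ below).

-- ===== PORT A =====
-- Page.html, first part (own line): branches in A's order; `cur` is the page's
-- _current_page (set only on TOP-level items by navbar's loop; children keep none,
-- which transliterates Python's un-set `self._current_page = None`).
def pageOwnHtml (name title url : String) (isChild : Bool) (cur : Option String) : String :=
  if cur == some name then
    if isChild then
      "<span class=\"thispage\"><span class=\"subpage\">" ++ title ++ "</span></span><br>"
    else
      "<span class=\"thispage\">" ++ title ++ "</span><br>"
  else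
    if isChild then
      "<a href=\"" ++ url ++ "\"><span class=\"subpage\">" ++ title ++ "</span></a><br>"
    else
      "<a href=\"" ++ url ++ "\">" ++ title ++ "</a><br>"

-- a navbar item: a Page (name, title, url, children as (name,title,url) triples) or a Sep
inductive NavItem where
  | page : String → String → String → List (String × String × String) → NavItem
  | sep  : NavItem

-- Page.html / Sep.html after navbar's loop called set_current_page_name(cur) on the item
def itemHtml (cur : Option String) : NavItem → String
  | NavItem.page name title url children =>
      children.foldl
        (fun h c => h ++ "\n" ++ pageOwnHtml c.1 c.2.1 c.2.2 true none)
        (pageOwnHtml name title url false cur)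
  | NavItem.sep => "<br>"

def navbar (this_page_name : Option String) : String :=
  let pages : List NavItem :=
    [ NavItem.page "Home" "Home" ".." [],
      NavItem.page "GeneralFAQ" "General FAQs" "../bits/GeneralFAQ.html" [],
      NavItem.sep,
      NavItem.page "mechanize" "mechanize" "../mechanize/"
        [ ("ccdocs", "handlers etc.", "../mechanize/doc.html"),
          ("forms", "forms", "../mechanize/forms.html") ] ]
  String.intercalate "\n" (pages.map (itemHtml this_page_name))

-- ===== PORT B =====
-- Source B's flat entry list: some (name, title, url, is_child) or none (= separator)
def navEntries : List (Option (String × String × String × Bool)) :=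
  [ some ("Home", "Home", "..", false),
    some ("GeneralFAQ", "General FAQs", "../bits/GeneralFAQ.html", false),
    none,
    some ("mechanize", "mechanize", "../mechanize/", false),
    some ("ccdocs", "handlers etc.", "../mechanize/doc.html", true),
    some ("forms", "forms", "../mechanize/forms.html", true) ]

def renderEntry (entry : Option (String × String × String × Bool)) (this_page_name : Option String) : String :=
  match entry with
  | none => "<br>"
  | some (name, title, url, isChild) =>
      let inner := if isChild then "<span class=\"subpage\">" ++ title ++ "</span>" else title
      if some name == this_page_name then
        "<span class=\"thispage\">" ++ inner ++ "</span><br>"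
      else
        "<a href=\"" ++ url ++ "\">" ++ inner ++ "</a><br>"

def navbar_alt (this_page_name : Option String) : String :=
  String.intercalate "\n" (navEntries.map (fun e => renderEntry e this_page_name))

-- ===== PRECONDITION & SPEC =====
-- A never passes the current page name down to child pages, so on
-- this_page_name = "ccdocs" or "forms" A renders a plain anchor while B renders the
-- intended 'thispage' highlight for that child.
def D_navbar (this_page_name : Option String) : Prop :=
  this_page_name = some "ccdocs" ∨ this_page_name = some "forms"
instance (this_page_name : Option String) : Decidable (D_navbar this_page_name) := by unfold D_navbar; infer_instance

def Spec_navbar (this_page_name : Option String) (out : String) : Prop :=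
  ¬ D_navbar this_page_name → out = navbar_alt this_page_name
instance (this_page_name : Option String) (out : String) : Decidable (Spec_navbar this_page_name out) := by unfold Spec_navbar; infer_instance

def pvDiffWitness_navbar : Option String := some "ccdocs"
def pvDiffWitnessOut_navbar : String × String :=
  ("<a href=\"..\">Home</a><br>\n<a href=\"../bits/GeneralFAQ.html\">General FAQs</a><br>\n<br>\n<a href=\"../mechanize/\">mechanize</a><br>\n<a href=\"../mechanize/doc.html\"><span class=\"subpage\">handlers etc.</span></a><br>\n<a href=\"../mechanize/forms.html\"><span class=\"subpage\">forms</span></a><br>",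
   "<a href=\"..\">Home</a><br>\n<a href=\"../bits/GeneralFAQ.html\">General FAQs</a><br>\n<br>\n<a href=\"../mechanize/\">mechanize</a><br>\n<span class=\"thispage\"><span class=\"subpage\">handlers etc.</span></span><br>\n<a href=\"../mechanize/forms.html\"><span class=\"subpage\">forms</span></a><br>")

-- ===== CLAIM (what is proved, stated in full; the proofs are below) =====
def Claim_unchanged_navbar : Prop := ∀ (this_page_name : Option String), Dom_navbar this_page_name → Spec_navbar this_page_name (navbar this_page_name)
def Claim_changed_navbar : Prop := Dom_navbar (pvDiffWitness_navbar) ∧ D_navbar (pvDiffWitness_navbar) ∧ navbar (pvDiffWitness_navbar) = pvDiffWitnessOut_navbar.1 ∧ navbar_alt (pvDiffWitness_navbar) = pvDiffWitnessOut_navbar.2 ∧ pvDiffWitnessOut_navbar.1 ≠ pvDiffWitnessOut_navbar.2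
def Claim_exact_navbar : Prop := ∀ (this_page_name : Option String), Dom_navbar this_page_name → D_navbar this_page_name → navbar this_page_name ≠ navbar_alt this_page_name

-- ===== LEMMAS AND PROOFS =====
set_option maxRecDepth 100000 in
set_option maxHeartbeats 1000000 in
theorem navbar_agree (t : Option String) (hc : some "ccdocs" ≠ t)
    (hf : some "forms" ≠ t) : navbar t = navbar_alt t := by
  cases t with
  | none => decide
  | some s =>
    by_cases h1 : s = "Home"
    · subst h1; decide
    by_cases h2 : s = "GeneralFAQ"
    · subst h2; decide
    by_cases h3 : s = "mechanize"
    · subst h3; decide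
    have hc' : s ≠ "ccdocs" := fun h => hc (by rw [h])
    have hf' : s ≠ "forms" := fun h => hf (by rw [h])
    have e1 : (s == "Home") = false := beq_eq_false_iff_ne.mpr h1
    have e2 : (s == "GeneralFAQ") = false := beq_eq_false_iff_ne.mpr h2
    have e3 : (s == "mechanize") = false := beq_eq_false_iff_ne.mpr h3
    have g1 : "Home" ≠ s := Ne.symm h1
    have g2 : "GeneralFAQ" ≠ s := Ne.symm h2
    have g3 : "mechanize" ≠ s := Ne.symm h3
    have g4 : "ccdocs" ≠ s := Ne.symm hc'
    have g5 : "forms" ≠ s := Ne.symm hf'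
    simp [navbar, navbar_alt, navEntries, itemHtml, renderEntry, pageOwnHtml,
          e1, e2, e3, g1, g2, g3, g4, g5]
    decide

-- ===== VERDICT (by name: the statement is the Claim_ definition above) =====
theorem navbar_spec : Claim_unchanged_navbar := by
  intro t _ hD
  exact navbar_agree t (fun h => hD (Or.inl h.symm)) (fun h => hD (Or.inr h.symm))

set_option maxRecDepth 40000 in
theorem navbar_changed : Claim_changed_navbar := by unfold Claim_changed_navbar; decide

set_option maxRecDepth 40000 in
theorem navbar_tight : Claim_exact_navbar := by
  intro t _ hD
  rcases hD with h | h <;> subst h <;> decide
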